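-- pv_equiv track=rewrite | github.com/zytedata/zyte-parsers | zyte_parsers/breadcrumbs.py | _has_special_class
-- ===== SOURCE A (Python) =====
-- import string
--
-- _PUNCTUATION_TRANS = str.maketrans("", "", string.punctuation)
--
-- def _has_special_class(class_attr: str) -> bool:
--     """
--     Check if a given value of class attribute has a class that relates to
--     drop down like "dropdown", "drop-down", "DropDown", etc.
--     """
--     if class_attr:
--         return any(
--             cls_name in c.translate(_PUNCTUATION_TRANS).lower().strip()
--             for cls_name in {"dropdown", "actions"}
--             for c in class_attr.split()
--         )
--     return False
-- ===== SOURCE B (Python) =====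
-- import string
--
-- _PUNCTUATION_TRANS = str.maketrans("", "", string.punctuation)
--
-- def _has_special_class(class_attr: str) -> bool:
--     """
--     Check if a given value of class attribute has a class that relates to
--     drop down like "dropdown", "drop-down", "DropDown", etc.
--     """
--     if not class_attr:
--         return False
--     s = class_attr.translate(_PUNCTUATION_TRANS).lower()
--     return "dropdown" in s or "actions" in s
-- ===== Notes on version B (the rewrite author's own statement) =====
-- stated objective: simpler
-- what changed: Replaces the nested any() over {dropdown,actions} x class_attr.split() (normalizing each token separately) with a single whole-string normalization followed by two substring tests; this is safe because punctuation removal and lowercasing preserve whitespace, so a keyword can never span token boundaries.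
import Mathlib
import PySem

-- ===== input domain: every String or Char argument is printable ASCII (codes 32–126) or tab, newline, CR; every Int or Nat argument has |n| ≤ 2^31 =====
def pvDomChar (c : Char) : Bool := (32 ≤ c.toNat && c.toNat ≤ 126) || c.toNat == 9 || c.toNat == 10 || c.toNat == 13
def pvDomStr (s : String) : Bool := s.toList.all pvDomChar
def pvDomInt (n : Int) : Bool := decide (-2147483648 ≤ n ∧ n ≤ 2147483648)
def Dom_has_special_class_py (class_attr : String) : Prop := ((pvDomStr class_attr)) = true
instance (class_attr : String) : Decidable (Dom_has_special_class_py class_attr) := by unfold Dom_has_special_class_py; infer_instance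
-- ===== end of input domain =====

-- B replaces A's nested per-token scan with one whole-string normalization plus two substring tests (simpler; same result).

-- string.punctuation; str.translate(_PUNCTUATION_TRANS) deletes exactly these characters.
def pvPunctChars : List Char := "!\"#$%&'()*+,-./:;<=>?@[\\]^_`{|}~".toList

def pvIsPunct (c : Char) : Bool := pvPunctChars.contains c

-- s.translate(_PUNCTUATION_TRANS), ported by hand (exact: the table maps each of the
-- 32 ASCII punctuation chars to None, i.e. deletes them, and every other char to itself).
def pyTranslatePunct (s : String) : String :=
  String.ofList (s.toList.filter (fun c => !pvIsPunct c))

-- ===== PORT A =====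
-- the set literal {"dropdown", "actions"} iterated as a list: any() has the same value in either order
def has_special_class_py (class_attr : String) : Bool :=
  if class_attr == "" then false
  else
    ["dropdown", "actions"].any fun cls_name =>
      (PySem.Str.split₀ class_attr).any fun c =>
        PySem.Str.isIn cls_name (PySem.Str.strip (PySem.Str.lower (pyTranslatePunct c)))

-- ===== PORT B =====
def has_special_class_py_alt (class_attr : String) : Bool :=
  if class_attr == "" then false
  else
    let s := PySem.Str.lower (pyTranslatePunct class_attr)
    PySem.Str.isIn "dropdown" s || PySem.Str.isIn "actions" s

-- ===== PRECONDITION & SPEC =====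
def Spec_has_special_class_py (class_attr : String) (out : Bool) : Prop := out = has_special_class_py_alt class_attr
instance (class_attr : String) (out : Bool) : Decidable (Spec_has_special_class_py class_attr out) := by unfold Spec_has_special_class_py; infer_instance

-- ===== CLAIM (what is proved, stated in full; the proofs are below) =====
def Claim_equal_has_special_class_py : Prop := ∀ (class_attr : String), Dom_has_special_class_py class_attr → Spec_has_special_class_py class_attr (has_special_class_py class_attr)

-- ===== LEMMAS AND PROOFS =====

-- normalization on the char-list side: translate-then-lower
def pvNormL (l : List Char) : List Char :=
  PySem.Chars.lower (l.filter (fun c => !pvIsPunct c))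

-- reference word splitter, proved equal to PySem.Chars.split₀ below
def pvWords (s : List Char) : List (List Char) :=
  match s with
  | [] => []
  | c :: rest =>
    if PySem.Chars.isspace c then pvWords rest
    else (c :: rest.takeWhile (fun d => !PySem.Chars.isspace d))
           :: pvWords (rest.dropWhile (fun d => !PySem.Chars.isspace d))
termination_by s.length
decreasing_by
  · simp
  · have := List.length_dropWhile_le (fun d => !PySem.Chars.isspace d) rest
    simp; omega

lemma punct_not_ws : pvPunctChars.all (fun c => !PySem.Chars.isspace c) = true := by
  have h : pvPunctChars =
      ['!', '"', '#', '$', '%', '&', '\'', '(', ')', '*', '+', ',', '-', '.', '/', ':',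
       ';', '<', '=', '>', '?', '@', '[', '\\', ']', '^', '_', '`', '{', '|', '}', '~'] := rfl
  rw [h]
  simp [PySem.Chars.isspace]

lemma isPunct_of_ws {c : Char} (h : PySem.Chars.isspace c = true) : pvIsPunct c = false := by
  by_contra hc
  have hmem : c ∈ pvPunctChars := by
    have : pvIsPunct c = true := by revert hc; cases pvIsPunct c <;> simp
    simpa [pvIsPunct] using this
  have := List.all_eq_true.mp punct_not_ws c hmem
  simp [h] at this

lemma ws_lowerChar (c : Char) : PySem.Chars.isspace (PySem.Chars.lowerChar c) = PySem.Chars.isspace c := by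
  by_cases h : PySem.Chars.isupper c = true
  · have hr : 65 ≤ c.toNat ∧ c.toNat ≤ 90 := by
      simp [PySem.Chars.isupper, Char.le_def] at h
      exact ⟨h.1, h.2⟩
    have hv : (c.toNat + 32).isValidChar := by left; omega
    have ht : (Char.ofNat (c.toNat + 32)).toNat = c.toNat + 32 := by
      rw [Char.toNat_ofNat, if_pos hv]
    rw [PySem.Chars.lowerChar, if_pos h]
    have h1 : PySem.Chars.isspace c = false := by
      simp [PySem.Chars.isspace]; omega
    have h2 : PySem.Chars.isspace (Char.ofNat (c.toNat + 32)) = false := by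
      simp [PySem.Chars.isspace, ht]; omega
    rw [h1, h2]
  · rw [PySem.Chars.lowerChar, if_neg h]

-- norm of a whitespace-headed list keeps that whitespace char in front
lemma pvNormL_cons_ws {c : Char} {rest : List Char} (h : PySem.Chars.isspace c = true) :
    pvNormL (c :: rest) = PySem.Chars.lowerChar c :: pvNormL rest := by
  simp [pvNormL, PySem.Chars.lower, isPunct_of_ws h]

lemma pvNormL_append (a b : List Char) : pvNormL (a ++ b) = pvNormL a ++ pvNormL b := by
  simp [pvNormL, PySem.Chars.lower]

lemma pvNormL_nonws {l : List Char} (h : ∀ c ∈ l, PySem.Chars.isspace c = false) :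
    ∀ c ∈ pvNormL l, PySem.Chars.isspace c = false := by
  intro c hc
  simp [pvNormL, PySem.Chars.lower] at hc
  obtain ⟨d, ⟨hd, -⟩, rfl⟩ := hc
  rw [ws_lowerChar]; exact h d hd

-- a whitespace-free keyword is an infix of u ++ d :: v (d whitespace) only on one side of d
lemma infix_append_ws {kw u v : List Char} {d : Char}
    (hkw : ∀ c ∈ kw, PySem.Chars.isspace c = false) (hd : PySem.Chars.isspace d = true) :
    kw <:+: u ++ d :: v ↔ kw <:+: u ∨ kw <:+: d :: v := by
  constructor
  · rintro ⟨a, b, h⟩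
    by_cases h1 : a.length + kw.length ≤ u.length
    · left
      have hpre : a ++ kw <+: u ++ d :: v := ⟨b, by simpa [List.append_assoc] using h⟩
      have := List.prefix_of_prefix_length_le hpre (List.prefix_append u (d :: v)) (by simp; omega)
      obtain ⟨t, ht⟩ := this
      exact ⟨a, t, by simpa [List.append_assoc] using ht⟩
    · by_cases h2 : u.length ≤ a.length
      · right
        have hpa : a <+: u ++ d :: v := ⟨kw ++ b, by simpa [List.append_assoc] using h⟩
        have := List.prefix_of_prefix_length_le (List.prefix_append u (d :: v)) hpa h2
        obtain ⟨a', rfl⟩ := this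
        refine ⟨a', b, ?_⟩
        have h' : u ++ (a' ++ (kw ++ b)) = u ++ d :: v := by simpa [List.append_assoc] using h
        have := List.append_cancel_left h'
        simpa [List.append_assoc] using this
      · exfalso
        have h3 : a ++ (kw ++ b) = u ++ d :: v := by simpa [List.append_assoc] using h
        have hlen : (a ++ (kw ++ b)).length = (u ++ d :: v).length := by rw [h3]
        simp at hlen
        have ha : a.length < u.length := by omega
        have hik : u.length - a.length < kw.length := by omega
        have hiu : u.length < (u ++ d :: v).length := by simp
        have hia : u.length < (a ++ (kw ++ b)).length := by simp; omega
        have e1 : (u ++ d :: v)[u.length]'hiu = d := by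
          rw [List.getElem_append_right (le_refl u.length)]; simp
        have e2 : (a ++ (kw ++ b))[u.length]'hia = kw[u.length - a.length]'hik := by
          rw [List.getElem_append_right (by omega : a.length ≤ u.length),
              List.getElem_append_left hik]
        have e3 : (a ++ (kw ++ b))[u.length]'hia = (u ++ d :: v)[u.length]'hiu :=
          List.getElem_of_eq h3 hia
        have hmem : d ∈ kw := by
          rw [← e1, ← e3, e2]; exact List.getElem_mem _
        have := hkw d hmem
        rw [hd] at this; exact absurd this (by simp)
  · rintro (⟨a, b, rfl⟩ | ⟨a, b, h⟩)
    · exact ⟨a, b ++ d :: v, by simp [List.append_assoc]⟩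
    · exact ⟨u ++ a, b, by rw [← h]; simp [List.append_assoc]⟩

lemma isIn_cons_ws {kw u : List Char} {d : Char}
    (hkw : ∀ c ∈ kw, PySem.Chars.isspace c = false) (hd : PySem.Chars.isspace d = true)
    (hne : kw ≠ []) :
    PySem.Chars.isIn kw (d :: u) = PySem.Chars.isIn kw u := by
  rw [Bool.eq_iff_iff, PySem.Chars.isIn_iff_infix, PySem.Chars.isIn_iff_infix,
      List.infix_cons_iff]
  constructor
  · rintro (hp | h)
    · cases kw with
      | nil => exact absurd rfl hne
      | cons k0 kw' =>
        obtain ⟨rfl, -⟩ := List.cons_prefix_cons.mp hp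
        have := hkw k0 (by simp)
        rw [hd] at this
        exact absurd this (by simp)
    · exact h
  · exact fun h => Or.inr h

lemma dropWhile_head_ws {l r : List Char} {d : Char}
    (h : l.dropWhile (fun x => !PySem.Chars.isspace x) = d :: r) :
    PySem.Chars.isspace d = true := by
  induction l with
  | nil => simp at h
  | cons x xs ih =>
    rw [List.dropWhile_cons] at h
    by_cases hx : (!PySem.Chars.isspace x) = true
    · rw [if_pos hx] at h; exact ih h
    · rw [if_neg hx] at h
      cases h
      simpa using hx

-- MAIN LEMMA: the keyword occurs in the whole normalized string iff in some normalized token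
lemma isIn_norm_words (kw : List Char) (s : List Char)
    (hkw : ∀ c ∈ kw, PySem.Chars.isspace c = false) (hne : kw ≠ []) :
    PySem.Chars.isIn kw (pvNormL s) = (pvWords s).any (fun t => PySem.Chars.isIn kw (pvNormL t)) := by
  induction s using pvWords.induct with
  | case1 =>
    simp [pvWords, pvNormL, PySem.Chars.lower, PySem.Chars.isIn_eq_false_iff, hne]
  | case2 c rest hc ih =>
    rw [pvNormL_cons_ws hc, isIn_cons_ws hkw (by rw [ws_lowerChar]; exact hc) hne]
    rw [ih]
    simp [pvWords, hc]
  | case3 c rest hc ih =>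
    have hc' : PySem.Chars.isspace c = false := by simpa using hc
    have hsplit : c :: rest =
        (c :: rest.takeWhile (fun d => !PySem.Chars.isspace d))
          ++ rest.dropWhile (fun d => !PySem.Chars.isspace d) := by
      simp [List.takeWhile_append_dropWhile]
    rw [pvWords]
    simp only [hc', Bool.false_eq_true, if_false, List.any_cons]
    rw [← ih]
    conv_lhs => rw [hsplit]
    rw [pvNormL_append]
    rcases hr : rest.dropWhile (fun d => !PySem.Chars.isspace d) with _ | ⟨d, r'⟩
    · simp [pvNormL, PySem.Chars.lower, PySem.Chars.isIn_eq_false_iff, hne]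
    · have hd : PySem.Chars.isspace d = true := dropWhile_head_ws hr
      rw [pvNormL_cons_ws hd]
      have hdl : PySem.Chars.isspace (PySem.Chars.lowerChar d) = true := by
        rw [ws_lowerChar]; exact hd
      rw [Bool.eq_iff_iff, Bool.or_eq_true, PySem.Chars.isIn_iff_infix,
          PySem.Chars.isIn_iff_infix, PySem.Chars.isIn_iff_infix]
      exact infix_append_ws hkw hdl

-- every word produced by the splitter consists of non-whitespace characters
lemma words_nonws {s t : List Char} (ht : t ∈ pvWords s) :
    ∀ c ∈ t, PySem.Chars.isspace c = false := by
  induction s using pvWords.induct with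
  | case1 => simp [pvWords] at ht
  | case2 c rest hc ih =>
    rw [pvWords, if_pos hc] at ht
    exact ih ht
  | case3 c rest hc ih =>
    have hc' : PySem.Chars.isspace c = false := by simpa using hc
    rw [pvWords] at ht
    simp only [hc', Bool.false_eq_true, if_false, List.mem_cons] at ht
    rcases ht with rfl | ht
    · intro x hx
      rcases List.mem_cons.mp hx with rfl | hx
      · exact hc'
      · simpa using List.mem_takeWhile_imp hx
    · exact ih ht

lemma dropWhile_eq_self_of_nonws {l : List Char} (h : ∀ c ∈ l, PySem.Chars.isspace c = false) :
    l.dropWhile PySem.Chars.isspace = l := by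
  cases l with
  | nil => simp
  | cons c rest => rw [List.dropWhile_cons_of_neg (by simp [h c (by simp)])]

lemma strip_of_nonws {l : List Char} (h : ∀ c ∈ l, PySem.Chars.isspace c = false) :
    PySem.Chars.strip l = l := by
  unfold PySem.Chars.strip PySem.Chars.lstrip PySem.Chars.rstrip
  rw [dropWhile_eq_self_of_nonws h,
      dropWhile_eq_self_of_nonws (by intro c hc; exact h c (List.mem_reverse.mp hc)),
      List.reverse_reverse]

-- split₀.go with any accumulator
lemma split0_go_acc (s : List Char) : ∀ cur acc,
    PySem.Chars.split₀.go s cur acc = acc.reverse ++ PySem.Chars.split₀.go s cur [] := by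
  induction s with
  | nil =>
    intro cur acc
    unfold PySem.Chars.split₀.go
    by_cases h : cur.isEmpty <;> simp [h]
  | cons c rest ih =>
    intro cur acc
    unfold PySem.Chars.split₀.go
    by_cases h : PySem.Chars.isspace c
    · by_cases h2 : cur.isEmpty <;> simp only [h, h2, if_true, if_false]
      · exact ih [] acc
      · rw [ih [] (cur.reverse :: acc), ih [] [cur.reverse]]
        simp
    · simp only [h, if_false]
      exact ih (c :: cur) acc

lemma split0_go_words (s : List Char) : ∀ cur,
    PySem.Chars.split₀.go s cur [] =
      (if cur = [] then pvWords s
       else (cur.reverse ++ s.takeWhile (fun d => !PySem.Chars.isspace d))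
              :: pvWords (s.dropWhile (fun d => !PySem.Chars.isspace d))) := by
  induction s with
  | nil =>
    intro cur
    unfold PySem.Chars.split₀.go
    by_cases h : cur = [] <;> simp [h, pvWords]
  | cons c rest ih =>
    intro cur
    unfold PySem.Chars.split₀.go
    by_cases h : PySem.Chars.isspace c
    · simp only [h, if_true]
      by_cases h2 : cur = []
      · simp only [h2, List.isEmpty_nil, if_true]
        rw [ih []]
        simp [pvWords, h]
      · have h2' : cur.isEmpty = false := by simpa [List.isEmpty_iff] using h2
        simp only [h2', Bool.false_eq_true, if_false, h2]
        rw [split0_go_acc rest [] [cur.reverse], ih []]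
        simp [pvWords, h, List.takeWhile_cons, List.dropWhile_cons]
    · simp only [h, if_false]
      rw [ih (c :: cur)]
      by_cases h2 : cur = []
      · simp [h2, pvWords, h, List.takeWhile_cons, List.dropWhile_cons]
      · simp [h2, pvWords, h, List.takeWhile_cons, List.dropWhile_cons, List.append_assoc]

lemma split0_eq_words (s : List Char) : PySem.Chars.split₀ s = pvWords s := by
  unfold PySem.Chars.split₀
  rw [split0_go_words]
  simp

lemma any_congr_mem {α : Type} {l : List α} {p q : α → Bool}
    (h : ∀ a ∈ l, p a = q a) : l.any p = l.any q := by
  induction l with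
  | nil => rfl
  | cons x xs ih =>
    simp only [List.any_cons]
    rw [h x (by simp), ih (fun a ha => h a (by simp [ha]))]

-- per-keyword bridge at the list level: A's per-token test equals B's whole-string test
lemma keyword_bridge (kw : List Char) (s : List Char)
    (hkw : ∀ c ∈ kw, PySem.Chars.isspace c = false) (hne : kw ≠ []) :
    (pvWords s).any (fun t => PySem.Chars.isIn kw (PySem.Chars.strip (pvNormL t)))
      = PySem.Chars.isIn kw (pvNormL s) := by
  rw [isIn_norm_words kw s hkw hne]
  exact any_congr_mem (fun t ht => by
    rw [strip_of_nonws (pvNormL_nonws (words_nonws ht))])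

lemma toList_normStr (x : String) :
    (PySem.Str.lower (pyTranslatePunct x)).toList = pvNormL x.toList := by
  simp [PySem.Str.lower, pyTranslatePunct, pvNormL]

-- A's inner any over split tokens, reduced to the list level, for one keyword
lemma a_side_eq (kw : String) (s : String)
    (hkw : ∀ c ∈ kw.toList, PySem.Chars.isspace c = false) (hne : kw.toList ≠ []) :
    ((PySem.Str.split₀ s).any fun c =>
        PySem.Str.isIn kw (PySem.Str.strip (PySem.Str.lower (pyTranslatePunct c))))
      = PySem.Str.isIn kw (PySem.Str.lower (pyTranslatePunct s)) := by
  have h1 : ∀ c : String,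
      PySem.Str.isIn kw (PySem.Str.strip (PySem.Str.lower (pyTranslatePunct c)))
        = PySem.Chars.isIn kw.toList (PySem.Chars.strip (pvNormL c.toList)) := by
    intro c
    rw [PySem.Str.isIn_eq]
    simp [PySem.Str.strip, PySem.Str.lower, pyTranslatePunct, pvNormL]
  calc ((PySem.Str.split₀ s).any fun c =>
          PySem.Str.isIn kw (PySem.Str.strip (PySem.Str.lower (pyTranslatePunct c))))
      = ((PySem.Str.split₀ s).map String.toList).any
          (fun t => PySem.Chars.isIn kw.toList (PySem.Chars.strip (pvNormL t))) := by
        rw [List.any_map]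
        exact any_congr_mem (fun c _ => h1 c)
    _ = (pvWords s.toList).any
          (fun t => PySem.Chars.isIn kw.toList (PySem.Chars.strip (pvNormL t))) := by
        rw [PySem.Str.split₀_map_toList, split0_eq_words]
    _ = PySem.Chars.isIn kw.toList (pvNormL s.toList) :=
        keyword_bridge kw.toList s.toList hkw hne
    _ = PySem.Str.isIn kw (PySem.Str.lower (pyTranslatePunct s)) := by
        rw [PySem.Str.isIn_eq, toList_normStr]

lemma dropdown_nonws : ∀ c ∈ "dropdown".toList, PySem.Chars.isspace c = false := by
  have h : "dropdown".toList = ['d', 'r', 'o', 'p', 'd', 'o', 'w', 'n'] := rfl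
  rw [h]
  simp [PySem.Chars.isspace]

lemma actions_nonws : ∀ c ∈ "actions".toList, PySem.Chars.isspace c = false := by
  have h : "actions".toList = ['a', 'c', 't', 'i', 'o', 'n', 's'] := rfl
  rw [h]
  simp [PySem.Chars.isspace]

-- ===== VERDICT (by name: the statement is the Claim_ definition above) =====
theorem has_special_class_py_spec : Claim_equal_has_special_class_py := by
  intro class_attr _
  unfold Spec_has_special_class_py has_special_class_py has_special_class_py_alt
  by_cases hs : class_attr == ""
  · have h0 : class_attr = "" := by simpa using hs
    subst h0
    rfl
  · have hs' : (class_attr == "") = false := by simpa using hs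
    simp only [hs', Bool.false_eq_true, if_false]
    simp only [List.any_cons, List.any_nil, Bool.or_false]
    rw [a_side_eq "dropdown" class_attr dropdown_nonws (by simp),
        a_side_eq "actions" class_attr actions_nonws (by simp)]
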